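-- pv_equiv track=rewrite | github.com/northstaraokeystone/gov-os | src/shipyard/lifecycle.py | validate_phase_sequence
-- ===== SOURCE A (Python) =====
-- LIFECYCLE_PHASES = [
--     "DESIGN",
--     "KEEL_LAYING",
--     "BLOCK_ASSEMBLY",
--     "LAUNCH",
--     "FITTING_OUT",
--     "SEA_TRIALS",
--     "DELIVERY",
-- ]
--
-- def validate_phase_sequence(phases: list) -> bool:
--     """
--     Validate that phases occurred in correct sequence.
--
--     Args:
--         phases: List of phase names
--
--     Returns:
--         True if sequence is valid
--     """
--     if not phases:
--         return True
--
--     for i, phase in enumerate(phases):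
--         expected_index = LIFECYCLE_PHASES.index(phase) if phase in LIFECYCLE_PHASES else -1
--         if i == 0:
--             if expected_index != 0 and expected_index != LIFECYCLE_PHASES.index(phases[0]):
--                 return False
--         else:
--             prev_phase = phases[i - 1]
--             prev_index = LIFECYCLE_PHASES.index(prev_phase) if prev_phase in LIFECYCLE_PHASES else -1
--             if expected_index != prev_index + 1:
--                 return False
--
--     return True
-- ===== SOURCE B (Python) =====
-- LIFECYCLE_PHASES = [
--     "DESIGN",
--     "KEEL_LAYING",
--     "BLOCK_ASSEMBLY",
--     "LAUNCH",
--     "FITTING_OUT",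
--     "SEA_TRIALS",
--     "DELIVERY",
-- ]
--
-- def validate_phase_sequence(phases: list) -> bool:
--     if not phases:
--         return True
--     start = LIFECYCLE_PHASES.index(phases[0])
--     return phases == LIFECYCLE_PHASES[start:start + len(phases)]
-- ===== Notes on version B (the rewrite author's own statement) =====
-- stated objective: simpler
-- what changed: Replaces the index-by-index loop that re-derives prev_index at every step with a single slice-equality check: look up the first phase's index once and compare the whole list against the consecutive run of LIFECYCLE_PHASES starting there.
import Mathlib
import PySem

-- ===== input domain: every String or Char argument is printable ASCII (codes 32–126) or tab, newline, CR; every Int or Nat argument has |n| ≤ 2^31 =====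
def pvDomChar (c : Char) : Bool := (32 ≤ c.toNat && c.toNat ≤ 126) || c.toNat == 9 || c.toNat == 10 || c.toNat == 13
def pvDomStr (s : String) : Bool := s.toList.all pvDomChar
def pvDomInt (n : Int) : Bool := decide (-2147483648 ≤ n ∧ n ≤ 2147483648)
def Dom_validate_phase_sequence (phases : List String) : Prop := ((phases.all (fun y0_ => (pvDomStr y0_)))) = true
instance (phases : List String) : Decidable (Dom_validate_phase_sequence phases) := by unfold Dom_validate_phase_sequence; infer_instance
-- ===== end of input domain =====

-- B replaces A's index-by-index loop with a single lookup of the first phase plus one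
-- slice-equality comparison; objective: simpler.

-- ===== PORT A =====
def LIFECYCLE_PHASES : List String :=
  ["DESIGN", "KEEL_LAYING", "BLOCK_ASSEMBLY", "LAUNCH", "FITTING_OUT", "SEA_TRIALS", "DELIVERY"]

-- `LIFECYCLE_PHASES.index(x) if x in LIFECYCLE_PHASES else -1`
def pvExpIdx (x : String) : Int :=
  ((PySem.List.index? LIFECYCLE_PHASES x).map (fun k => (k : Int))).getD (-1)

-- the body of A's `for i, phase in enumerate(phases)` loop (returns False ↦ the element fails)
def pvCheck (phases : List String) (ip : Int × String) : Bool :=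
  let i := ip.1
  let phase := ip.2
  let expected := pvExpIdx phase
  if i == 0 then
    -- `if expected_index != 0 and expected_index != LIFECYCLE_PHASES.index(phases[0]): return False`
    -- when phases[0] ∉ LIFECYCLE_PHASES Python raises ValueError here (excluded by Pre_)
    !(expected != 0 &&
      (match PySem.List.index? LIFECYCLE_PHASES (PySem.List.pyGetD phases 0 "") with
       | some j => expected != (j : Int)
       | none => true))
  else
    let prev_phase := PySem.List.pyGetD phases (i - 1) ""
    let prev_index := pvExpIdx prev_phase
    expected == prev_index + 1

def validate_phase_sequence (phases : List String) : Bool :=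
  if phases.isEmpty then true
  else (PySem.List.enumerate phases 0).all (pvCheck phases)

-- ===== PORT B =====
def validate_phase_sequence_alt (phases : List String) : Bool :=
  match phases with
  | [] => true
  | p0 :: _ =>
    match PySem.List.index? LIFECYCLE_PHASES p0 with
    | none => false   -- Python raises ValueError here (excluded by Pre_)
    | some s =>
      phases == PySem.List.slice LIFECYCLE_PHASES (some (s : Int)) (some ((s : Int) + (phases.length : Int)))

-- ===== PRECONDITION & SPEC =====
-- Pre_ excludes only the inputs on which both Pythons raise ValueError: a nonempty list whose
-- first element is not a lifecycle phase (`LIFECYCLE_PHASES.index(phases[0])` raises in A and B alike).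
def Pre_validate_phase_sequence (phases : List String) : Prop :=
  phases = [] ∨ phases.headD "" ∈ LIFECYCLE_PHASES
instance (phases : List String) : Decidable (Pre_validate_phase_sequence phases) := by
  unfold Pre_validate_phase_sequence; infer_instance

def pvWitness_validate_phase_sequence : List String := ["DESIGN", "KEEL_LAYING"]

def Spec_validate_phase_sequence (phases : List String) (out : Bool) : Prop := out = validate_phase_sequence_alt phases
instance (phases : List String) (out : Bool) : Decidable (Spec_validate_phase_sequence phases out) := by unfold Spec_validate_phase_sequence; infer_instance

-- ===== CLAIM (what is proved, stated in full; the proofs are below) =====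
def Claim_equal_validate_phase_sequence : Prop := ∀ (phases : List String), Dom_validate_phase_sequence phases → Pre_validate_phase_sequence phases → Spec_validate_phase_sequence phases (validate_phase_sequence phases)

-- ===== LEMMAS AND PROOFS =====

-- "the phases are the consecutive run whose first expected index is j"
def pvChain (j : Int) (l : List String) : Bool :=
  match l with
  | [] => true
  | x :: xs => (pvExpIdx x == j) && pvChain (j + 1) xs

theorem pvExpIdx_lt (x : String) : pvExpIdx x < 7 := by
  unfold pvExpIdx
  cases h : PySem.List.index? LIFECYCLE_PHASES x with
  | none => decide
  | some k =>
    obtain ⟨hk, -, -⟩ := PySem.List.getElem_of_index?_eq_some h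
    have hk7 : k < 7 := by simpa [LIFECYCLE_PHASES] using hk
    show (k : Int) < 7
    exact_mod_cast hk7

theorem pvExpIdx_eq_iff (x : String) (j : Nat) (hj : j < 7) :
    pvExpIdx x = (j : Int) ↔ x = LIFECYCLE_PHASES.getD j "" := by
  constructor
  · intro h
    unfold pvExpIdx at h
    cases hix : PySem.List.index? LIFECYCLE_PHASES x with
    | none =>
      rw [hix] at h
      have h' : (-1 : Int) = (j : Int) := h
      omega
    | some k =>
      rw [hix] at h
      have h0 : (k : Int) = (j : Int) := h
      have h' : k = j := by exact_mod_cast h0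
      subst h'
      obtain ⟨hk, hx, -⟩ := PySem.List.getElem_of_index?_eq_some hix
      rw [← hx, List.getD_eq_getElem _ _ hk]
  · intro h
    subst h
    interval_cases j <;> decide

theorem pvChain_eq (l : List String) : ∀ (j : Nat),
    pvChain (j : Int) l = decide (l = (LIFECYCLE_PHASES.drop j).take l.length) := by
  induction l with
  | nil => intro j; simp [pvChain]
  | cons x xs ih =>
    intro j
    rw [pvChain]
    by_cases hj : j < 7
    · have hjl : j < LIFECYCLE_PHASES.length := by simp [LIFECYCLE_PHASES]; omega
      rw [List.drop_eq_getElem_cons hjl, List.length_cons, List.take_succ_cons]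
      have hgd : LIFECYCLE_PHASES[j] = LIFECYCLE_PHASES.getD j "" :=
        (List.getD_eq_getElem _ _ hjl).symm
      by_cases hx : x = LIFECYCLE_PHASES.getD j ""
      · have he : pvExpIdx x = (j : Int) := (pvExpIdx_eq_iff x j hj).mpr hx
        have hc : ((j : Int) + 1) = ((j + 1 : Nat) : Int) := by push_cast; ring
        rw [he, beq_self_eq_true, Bool.true_and, hc, ih (j + 1), hgd, ← hx]
        simp
      · have he : (pvExpIdx x == (j : Int)) = false :=
          beq_eq_false_iff_ne.mpr (fun h => hx ((pvExpIdx_eq_iff x j hj).mp h))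
        rw [he, Bool.false_and]
        have hne2 : x :: xs ≠ LIFECYCLE_PHASES[j] :: List.take xs.length (LIFECYCLE_PHASES.drop (j + 1)) := by
          intro hc
          injection hc with h1 _
          exact hx (hgd ▸ h1)
        exact (decide_eq_false hne2).symm
    · have hdrop : LIFECYCLE_PHASES.drop j = [] := by
        apply List.drop_eq_nil_of_le; simp [LIFECYCLE_PHASES]; omega
      have he : (pvExpIdx x == (j : Int)) = false := by
        apply beq_eq_false_iff_ne.mpr
        have := pvExpIdx_lt x
        intro h; rw [h] at this
        omega
      rw [hdrop, he, Bool.false_and]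
      simp

theorem pvLoop (l : List String) : ∀ (prev : String) (pre : List String),
    (PySem.List.enumerate l ((pre.length : Int) + 1)).all (pvCheck (pre ++ prev :: l))
      = pvChain (pvExpIdx prev + 1) l := by
  induction l with
  | nil => intro prev pre; simp [PySem.List.enumerate_nil, pvChain]
  | cons x xs ih =>
    intro prev pre
    rw [PySem.List.enumerate_cons, List.all_cons]
    have hne : (((pre.length : Int) + 1) == 0) = false := by
      apply beq_eq_false_iff_ne.mpr
      omega
    have hget : PySem.List.pyGetD (pre ++ prev :: x :: xs) ((pre.length : Int) + 1 - 1) ""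
        = prev := by
      have h1 : ((pre.length : Int) + 1 - 1) = ((pre.length : Nat) : Int) := by ring
      rw [h1, PySem.List.pyGetD_natCast]
      simp [List.getD]
    have htail : (PySem.List.enumerate xs ((pre.length : Int) + 1 + 1)).all
        (pvCheck (pre ++ prev :: x :: xs)) = pvChain (pvExpIdx x + 1) xs := by
      have hlist : pre ++ prev :: x :: xs = (pre ++ [prev]) ++ x :: xs := by simp
      have hlen : ((pre.length : Int) + 1 + 1) = (((pre ++ [prev]).length : Nat) : Int) + 1 := by
        simp
      rw [hlist, hlen, ih x (pre ++ [prev])]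
    rw [pvCheck]
    simp only [hne, Bool.false_eq_true, if_false, hget, htail]
    rw [pvChain]
    by_cases h : pvExpIdx x = pvExpIdx prev + 1
    · rw [h]
    · rw [beq_eq_false_iff_ne.mpr h, Bool.false_and, Bool.false_and]

theorem validate_phase_sequence_spec : Claim_equal_validate_phase_sequence := by
  intro phases _ hpre
  unfold Spec_validate_phase_sequence
  cases phases with
  | nil => rfl
  | cons p0 rest =>
    have hp0 : p0 ∈ LIFECYCLE_PHASES := by
      rcases hpre with h | h
      · exact absurd h (by simp)
      · simpa using h
    have hsome : (PySem.List.index? LIFECYCLE_PHASES p0).isSome := by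
      cases hix : PySem.List.index? LIFECYCLE_PHASES p0 with
      | none => exact absurd hp0 ((PySem.List.index?_eq_none_iff _ _).mp hix)
      | some k => rfl
    obtain ⟨s, hs⟩ := Option.isSome_iff_exists.mp hsome
    obtain ⟨hsl, hgs, -⟩ := PySem.List.getElem_of_index?_eq_some hs
    have hs7 : s < 7 := by
      have h2 := hsl
      simp [LIFECYCLE_PHASES] at h2
      exact h2
    have hE : pvExpIdx p0 = (s : Int) := by unfold pvExpIdx; rw [hs]; rfl
    have hs' : List.idxOf? p0 LIFECYCLE_PHASES = some s := by
      rw [← PySem.List.index?_eq_idxOf?]; exact hs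
    -- A's loop: the first iteration passes, the rest is the consecutive-run check
    have hA : validate_phase_sequence (p0 :: rest) = pvChain ((s : Int) + 1) rest := by
      unfold validate_phase_sequence
      rw [if_neg (by simp)]
      rw [PySem.List.enumerate_cons, List.all_cons]
      have hhead : pvCheck (p0 :: rest) (0, p0) = true := by
        rw [pvCheck]
        simp [PySem.List.pyGetD_zero_cons, hs', hE]
      rw [hhead, Bool.true_and]
      have hl := pvLoop rest p0 []
      rw [hE] at hl
      simpa using hl
    have hcast : ((s : Int) + 1) = ((s + 1 : Nat) : Int) := by push_cast; ring
    rw [hA, hcast, pvChain_eq rest (s + 1)]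
    -- B: the slice comparison
    have hdrop : LIFECYCLE_PHASES.drop s = p0 :: LIFECYCLE_PHASES.drop (s + 1) := by
      rw [List.drop_eq_getElem_cons hsl, hgs]
    show _ = validate_phase_sequence_alt (p0 :: rest)
    simp only [validate_phase_sequence_alt, hs]
    rw [PySem.List.slice_natCast_add, hdrop, List.length_cons, List.take_succ_cons]
    by_cases hr : rest = List.take rest.length (LIFECYCLE_PHASES.drop (s + 1))
    · rw [← hr]
      simp
    · have : (p0 :: rest == p0 :: List.take rest.length (LIFECYCLE_PHASES.drop (s + 1))) = false := by
        apply beq_eq_false_iff_ne.mpr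
        simp [hr]
      rw [this]
      simp [hr]
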